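-- pv_equiv track=rewrite | github.com/sunwoopark0512/travelkit | scripts/rewrite_failed_sections.py | replace_preamble_preview
-- ===== SOURCE A (Python) =====
-- def replace_preamble_preview(md: str, new_preview_line: str) -> str:
--     """
--     Replace only the preview one-liner (line after H1, before Pass Condition).
--     """
--     lines = md.splitlines()
--     # find title
--     title_idx = None
--     for i, ln in enumerate(lines):
--         if ln.startswith("# "):
--             title_idx = i
--             break
--     if title_idx is None:
--         return md
--
--     # locate preview line
--     preview_idx = None
--     for j in range(title_idx + 1, len(lines)):
--         ln = lines[j].strip()
--         if not ln:
--             continue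
--         if ln.startswith("**Pass Condition:**"):
--             break
--         preview_idx = j
--         break
--
--     if preview_idx is None:
--         # insert just before Pass Condition if found
--         for j in range(title_idx + 1, len(lines)):
--             if lines[j].strip().startswith("**Pass Condition:**"):
--                 lines.insert(j, new_preview_line)
--                 return "\n".join(lines)
--         # fallback: append after title
--         lines.insert(title_idx + 1, new_preview_line)
--         return "\n".join(lines)
--
--     lines[preview_idx] = new_preview_line
--     return "\n".join(lines)
--
-- # --- Rewrite generation (mock/llm) ---
--
--     if section_key == "## System Claim":
--         return "\n".join([
--             "## System Claim",
--             "This content is strictly structured for machine readability.",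
--             "- **Routine Card**: Standardized workflow unit.",
--             "- **Pass/Fail**: Binary outcome enforced.",
--             "- **card_id**: Unique identifier for tracking.",
--             "- **Card → Weekly Routine → Monthly Diagnosis**: Hierarchy definition.",
--         ])
--
--     if section_key == "## Procedure":
--         return "\n".join([
--             "## Procedure",
--             "1. **Preparation**: Ensure the environment is ready (0s).",
--             "2. **Execution**: Perform the core action (30-60s).",
--             "3. **Verification**: Check against the pass condition (10s).",
--             "4. **Recording**: Log the result immediately (5s).",
--         ])
--
--     if section_key == "## Definitions":
--         locked = "**Unlock Rule:**" in current_md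
--         lines = [
--             "## Definitions",
--             "| Term | Definition |",
--             "| :--- | :--- |",
--             "| **Routine Card** | 5개 체크 질문 묶음(0~5점). |",
--             "| **Pass Condition** | 체크 5개 중 4개 이상 통과. |",
--             "| **card_id** | 익명 집계용 고정 식별자(개인정보 없음). |",
--         ]
--         if locked:
--              lines.append("| **Unlock Rule** | 최근 7일 평균 4.2/5 이상 + 3일 연속 통과. |")
--         else:
--              lines.append("| **Status** | 현재 누구나 접근 가능한 공개 카드입니다. |")
--         return "\n".join(lines)
--
--     if section_key == "## FAQ":
--         return "\n".join([
--             "## FAQ",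
--             "**Q1. 실패하면 어떻게 하나요?**  ",
--             "A1. 오늘은 리셋하지 말고 ‘Action(60s)’만 1회 더 하고 종료합니다.",
--             "",
--             "**Q2. 통증/불편하면요?**  ",
--             "A2. 통증이 있으면 즉시 중단하고, 범위를 50%로 줄여 재측정합니다.",
--             "",
--             "**Q3. 빈도/주간 루틴은요?**  ",
--             "A3. 주 3회만 기록합니다. 연속 2회 FAIL이면 난이도를 한 단계 낮춥니다.",
--         ])
--
--     if section_key == "## Evidence (Optional but recommended)":
--         return "\n".join([
--             "## Evidence (Optional but recommended)",
--             "- 기록: card_id 기준으로만 익명 집계합니다. (user_id/댓글/자유 텍스트 저장 금지)",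
--             "- 필드: date, score(0~5), pass(true/false), card_id",
--             "- 위젯: 오늘 통과율 + n / 가장 많이 막힌 체크 Top1 / 주간 평균 점수",
--         ])
--
--     # default: no change
--     return None  # type: ignore
-- ===== SOURCE B (Python) =====
-- def replace_preamble_preview(md: str, new_preview_line: str) -> str:
--     # Single streaming pass with a 3-state machine; blank lines after the title
--     # are buffered in `pending` until we learn whether a preview line exists.
--     out = []
--     pending = []
--     state = 0  # 0: before title, 1: after title seeking preview, 2: done
--     for ln in md.splitlines():
--         if state == 0:
--             out.append(ln)
--             if ln.startswith("# "):
--                 state = 1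
--         elif state == 1:
--             s = ln.strip()
--             if not s:
--                 pending.append(ln)
--             else:
--                 out.extend(pending)
--                 pending = []
--                 if s.startswith("**Pass Condition:**"):
--                     out.append(new_preview_line)
--                     out.append(ln)
--                 else:
--                     out.append(new_preview_line)
--                 state = 2
--         else:
--             out.append(ln)
--     if state == 0:
--         return md
--     if state == 1:
--         out.append(new_preview_line)
--         out.extend(pending)
--     return "\n".join(out)
-- ===== Notes on version B (the rewrite author's own statement) =====
-- stated objective: alternative
-- what changed: A's staged index scans (find title, locate preview skipping blanks, separate Pass-Condition search, fallback) with in-place list mutation are replaced by one streaming pass: a 3-state machine over the lines that emits into an output accumulator, buffering blank lines after the title until the first non-blank decides insert-vs-replace.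
import Mathlib
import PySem

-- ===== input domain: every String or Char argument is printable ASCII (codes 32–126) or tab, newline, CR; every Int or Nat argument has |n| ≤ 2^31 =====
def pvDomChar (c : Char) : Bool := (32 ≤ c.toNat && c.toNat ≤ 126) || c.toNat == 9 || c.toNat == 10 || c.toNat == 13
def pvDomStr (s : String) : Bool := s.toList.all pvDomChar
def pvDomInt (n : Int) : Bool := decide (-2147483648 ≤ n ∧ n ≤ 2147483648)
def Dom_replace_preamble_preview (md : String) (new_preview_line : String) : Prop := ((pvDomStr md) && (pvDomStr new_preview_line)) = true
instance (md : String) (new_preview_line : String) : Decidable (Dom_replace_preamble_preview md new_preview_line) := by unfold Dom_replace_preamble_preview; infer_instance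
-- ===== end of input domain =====

-- B replaces A's staged index scans and in-place mutation by one streaming pass with a
-- 3-state machine and a buffer of pending blank lines (objective: alternative; same value).

-- ===== PORT A =====
-- first i with lines[i].startswith("# ") (A's first for-loop with break)
def pvFindTitleA : List String → Option Nat
  | [] => none
  | ln :: rest =>
    if PySem.Str.startswith ln "# " then some 0
    else (pvFindTitleA rest).map (· + 1)

-- A's "locate preview line" loop over lines[title_idx+1:]: skip blank, stop at Pass
-- Condition (none), else the first non-blank index (some); index relative to the tail.
def pvLocatePreviewA : List String → Option Nat
  | [] => none
  | ln :: rest =>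
    let s := PySem.Str.strip ln
    if s = "" then (pvLocatePreviewA rest).map (· + 1)
    else if PySem.Str.startswith s "**Pass Condition:**" then none
    else some 0

-- A's second loop: first j (relative to the tail) whose stripped line starts with Pass Condition
def pvFindPCA : List String → Option Nat
  | [] => none
  | ln :: rest =>
    if PySem.Str.startswith (PySem.Str.strip ln) "**Pass Condition:**" then some 0
    else (pvFindPCA rest).map (· + 1)

def replace_preamble_preview (md : String) (new_preview_line : String) : String :=
  match pvFindTitleA (PySem.Str.splitlines md) with
  | none => md
  | some t =>
    match pvLocatePreviewA ((PySem.Str.splitlines md).drop (t + 1)) with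
    | some p =>
      -- lines[preview_idx] = new_preview_line: index t+1+p is in range, so List.set
      -- is exactly Python's in-range list assignment
      PySem.Str.join "\n" ((PySem.Str.splitlines md).set (t + 1 + p) new_preview_line)
    | none =>
      match pvFindPCA ((PySem.Str.splitlines md).drop (t + 1)) with
      | some j =>
        -- lines.insert(j, new_preview_line) at in-range nonnegative index = take/cons/drop
        PySem.Str.join "\n" ((PySem.Str.splitlines md).take (t + 1 + j) ++ new_preview_line :: (PySem.Str.splitlines md).drop (t + 1 + j))
      | none =>
        -- lines.insert(title_idx + 1, new_preview_line), index ≤ len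
        PySem.Str.join "\n" ((PySem.Str.splitlines md).take (t + 1) ++ new_preview_line :: (PySem.Str.splitlines md).drop (t + 1))

-- ===== PORT B =====
-- state 1 of B's loop: after the title, seeking the first non-blank line;
-- `pending` is the buffer of blank lines collected so far (in order).
def pvState1B (new : String) (pending : List String) : List String → List String
  | [] => new :: pending            -- loop ended in state 1: emit new line, then flush pending
  | ln :: rest =>
    let s := PySem.Str.strip ln
    if s = "" then pvState1B new (pending ++ [ln]) rest
    else if PySem.Str.startswith s "**Pass Condition:**" then
      pending ++ new :: ln :: rest  -- flush, insert before the Pass-Condition line, copy rest (state 2)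
    else
      pending ++ new :: rest        -- flush, replace the preview line, copy rest (state 2)

-- state 0 of B's loop: copying lines while looking for the title; none = loop ended in state 0
def pvState0B (new : String) : List String → Option (List String)
  | [] => none
  | ln :: rest =>
    if PySem.Str.startswith ln "# " then some (ln :: pvState1B new [] rest)
    else (pvState0B new rest).map (ln :: ·)

def replace_preamble_preview_alt (md : String) (new_preview_line : String) : String :=
  match pvState0B new_preview_line (PySem.Str.splitlines md) with
  | none => md
  | some out => PySem.Str.join "\n" out

-- ===== PRECONDITION & SPEC =====
def Spec_replace_preamble_preview (md : String) (new_preview_line : String) (out : String) : Prop := out = replace_preamble_preview_alt md new_preview_line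
instance (md : String) (new_preview_line : String) (out : String) : Decidable (Spec_replace_preamble_preview md new_preview_line out) := by unfold Spec_replace_preamble_preview; infer_instance

-- ===== CLAIM (what is proved, stated in full; the proofs are below) =====
def Claim_equal_replace_preamble_preview : Prop := ∀ (md : String) (new_preview_line : String), Dom_replace_preamble_preview md new_preview_line → Spec_replace_preamble_preview md new_preview_line (replace_preamble_preview md new_preview_line)

-- ===== LEMMAS AND PROOFS =====

theorem pvPC_empty : PySem.Chars.startswith ([] : List Char) ['*', '*', 'P', 'a', 's', 's', ' ', 'C', 'o', 'n', 'd', 'i', 't', 'i', 'o', 'n', ':', '*', '*'] = false := by decide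

-- B's state-1 loop, characterised by A's two scans over the same tail
theorem pvState1B_char (new : String) (tail pending : List String) :
    pvState1B new pending tail =
      match pvLocatePreviewA tail with
      | some p => pending ++ tail.take p ++ new :: tail.drop (p + 1)
      | none =>
        match pvFindPCA tail with
        | some j => pending ++ tail.take j ++ new :: tail.drop j
        | none => new :: (pending ++ tail) := by
  induction tail generalizing pending with
  | nil => simp [pvState1B, pvLocatePreviewA, pvFindPCA]
  | cons a l ih =>
    by_cases hb : PySem.Str.strip a = ""
    · have hB : pvState1B new pending (a :: l) = pvState1B new (pending ++ [a]) l := by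
        simp [pvState1B, hb]
      rw [hB, ih]
      have hloc : pvLocatePreviewA (a :: l) = (pvLocatePreviewA l).map (· + 1) := by
        simp [pvLocatePreviewA, hb]
      have hpc : pvFindPCA (a :: l) = (pvFindPCA l).map (· + 1) := by
        simp [pvFindPCA, hb, pvPC_empty]
      rw [hloc, hpc]
      cases pvLocatePreviewA l with
      | some p => simp
      | none =>
        cases pvFindPCA l with
        | some j => simp
        | none => simp
    · by_cases hpc : PySem.Str.startswith (PySem.Str.strip a) "**Pass Condition:**" = true
      · have hpc' : PySem.Chars.startswith (PySem.Chars.strip a.toList)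
            ['*', '*', 'P', 'a', 's', 's', ' ', 'C', 'o', 'n', 'd', 'i', 't', 'i', 'o', 'n', ':', '*', '*'] = true := by
          simpa using hpc
        have hB : pvState1B new pending (a :: l) = pending ++ new :: a :: l := by
          simp [pvState1B, hb, hpc']
        have hloc : pvLocatePreviewA (a :: l) = none := by
          simp [pvLocatePreviewA, hb, hpc']
        have hfp : pvFindPCA (a :: l) = some 0 := by
          simp [pvFindPCA, hpc']
        rw [hB, hloc, hfp]
        simp
      · rw [Bool.not_eq_true] at hpc
        have hpc' : PySem.Chars.startswith (PySem.Chars.strip a.toList)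
            ['*', '*', 'P', 'a', 's', 's', ' ', 'C', 'o', 'n', 'd', 'i', 't', 'i', 'o', 'n', ':', '*', '*'] = false := by
          simpa using hpc
        have hB : pvState1B new pending (a :: l) = pending ++ new :: l := by
          simp [pvState1B, hb, hpc']
        have hloc : pvLocatePreviewA (a :: l) = some 0 := by
          simp [pvLocatePreviewA, hb, hpc']
        rw [hB, hloc]
        simp

-- B's state-0 loop, characterised by A's title scan
theorem pvState0B_char (new : String) (lines : List String) :
    pvState0B new lines =
      (pvFindTitleA lines).map
        (fun t => lines.take (t + 1) ++ pvState1B new [] (lines.drop (t + 1))) := by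
  induction lines with
  | nil => rfl
  | cons a l ih =>
    by_cases h : PySem.Str.startswith a "# " = true
    · have h' : PySem.Chars.startswith a.toList ['#', ' '] = true := by simpa using h
      simp [pvState0B, pvFindTitleA, h']
    · rw [Bool.not_eq_true] at h
      have h' : PySem.Chars.startswith a.toList ['#', ' '] = false := by simpa using h
      cases hF : pvFindTitleA l with
      | none => simp [pvState0B, pvFindTitleA, h', ih, hF]
      | some t => simp [pvState0B, pvFindTitleA, h', ih, hF]

theorem locatePreview_lt (tail : List String) (k : Nat)
    (h : pvLocatePreviewA tail = some k) : k < tail.length := by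
  induction tail generalizing k with
  | nil => simp [pvLocatePreviewA] at h
  | cons a l ih =>
    simp only [pvLocatePreviewA] at h
    split_ifs at h with hb hpc
    · obtain ⟨k', hk', rfl⟩ := Option.map_eq_some_iff.mp h
      simpa using Nat.succ_lt_succ (ih k' hk')
    all_goals simp only [Option.some.injEq] at h
    all_goals (subst h; simp)

-- in-range assignment as take/cons/drop, split at the head/tail boundary
theorem set_split (lines : List String) (t k : Nat) (x : String)
    (hk : k < (lines.drop (t + 1)).length) :
    lines.set (t + 1 + k) x =
      lines.take (t + 1) ++ ((lines.drop (t + 1)).take k ++ x :: (lines.drop (t + 1)).drop (k + 1)) := by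
  have hlen : t + 1 + k < lines.length := by simp at hk ⊢; omega
  have e : t + 1 + k + 1 = t + 1 + (k + 1) := by omega
  rw [List.set_eq_take_cons_drop x hlen, List.take_add, List.append_assoc, List.drop_drop, e]

-- in-range insertion as take/cons/drop, split at the head/tail boundary
theorem insert_split (lines : List String) (t k : Nat) (x : String) :
    lines.take (t + 1 + k) ++ x :: lines.drop (t + 1 + k) =
      lines.take (t + 1) ++ ((lines.drop (t + 1)).take k ++ x :: (lines.drop (t + 1)).drop k) := by
  rw [List.take_add, List.append_assoc, List.drop_drop]

-- ===== VERDICT (by name: the statement is the Claim_ definition above) =====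
theorem replace_preamble_preview_spec : Claim_equal_replace_preamble_preview := by
  intro md new_preview_line _
  show replace_preamble_preview md new_preview_line = replace_preamble_preview_alt md new_preview_line
  unfold replace_preamble_preview replace_preamble_preview_alt
  rw [pvState0B_char]
  cases hT : pvFindTitleA (PySem.Str.splitlines md) with
  | none => rfl
  | some t =>
    simp only [Option.map_some]
    rw [pvState1B_char]
    cases hL : pvLocatePreviewA ((PySem.Str.splitlines md).drop (t + 1)) with
    | some p =>
      simp only [List.nil_append]
      rw [set_split _ t p new_preview_line (locatePreview_lt _ p hL)]
    | none =>
      cases hP : pvFindPCA ((PySem.Str.splitlines md).drop (t + 1)) with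
      | some j =>
        simp only [List.nil_append]
        rw [insert_split]
      | none => simp
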